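-- pv_equiv track=rewrite | github.com/chrhyman/mtg-mgr | util.py | only1
-- ===== SOURCE A (Python) =====
-- def only1(lst):
--     found_true = False
--     for b in lst:
--         if b:
--             if found_true:
--                 return False
--             else:
--                 found_true = True
--     return found_true
-- ===== SOURCE B (Python) =====
-- def only1(lst):
--     return sum(1 for b in lst if b) == 1
-- ===== Notes on version B (the rewrite author's own statement) =====
-- stated objective: simpler
-- what changed: Replaces the boolean flag with early-exit loop by a one-line count of truthy elements compared to 1.
import Mathlib
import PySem

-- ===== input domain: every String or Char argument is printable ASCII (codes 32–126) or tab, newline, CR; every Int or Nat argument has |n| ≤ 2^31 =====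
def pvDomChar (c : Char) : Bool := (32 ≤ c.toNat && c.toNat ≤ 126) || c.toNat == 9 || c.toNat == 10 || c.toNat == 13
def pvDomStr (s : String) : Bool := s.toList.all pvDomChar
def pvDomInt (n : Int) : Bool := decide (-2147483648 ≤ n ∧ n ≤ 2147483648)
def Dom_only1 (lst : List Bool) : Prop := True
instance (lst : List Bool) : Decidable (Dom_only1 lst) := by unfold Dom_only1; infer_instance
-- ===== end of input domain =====

-- B replaces A's flag-with-early-return loop by counting truthy elements and comparing to 1.

-- ===== PORT A =====
-- literal port: loop with found_true flag and early 'return False'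
def only1Loop (lst : List Bool) (found_true : Bool) : Bool :=
  match lst with
  | [] => found_true
  | b :: rest =>
    if b then
      if found_true then false
      else only1Loop rest true
    else only1Loop rest found_true

def only1 (lst : List Bool) : Bool := only1Loop lst false

-- ===== PORT B =====
def only1_alt (lst : List Bool) : Bool :=
  ((lst.filter (fun b => b)).map (fun _ => (1 : Int))).sum == 1

-- ===== PRECONDITION & SPEC =====
def Spec_only1 (lst : List Bool) (out : Bool) : Prop := out = only1_alt lst
instance (lst : List Bool) (out : Bool) : Decidable (Spec_only1 lst out) := by unfold Spec_only1; infer_instance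

-- ===== CLAIM (what is proved, stated in full; the proofs are below) =====
def Claim_equal_only1 : Prop := ∀ (lst : List Bool), Dom_only1 lst → Spec_only1 lst (only1 lst)

-- ===== LEMMAS AND PROOFS =====
lemma altSum_eq (lst : List Bool) :
    ((lst.filter (fun b => b)).map (fun _ => (1 : Int))).sum = (lst.count true : Int) := by
  induction lst with
  | nil => simp
  | cons b rest ih =>
    rw [List.count_cons, List.filter_cons]
    cases b <;> simp <;> simp [List.count, List.countP_eq_length_filter] <;> omega

lemma only1Loop_char (lst : List Bool) (f : Bool) :
    only1Loop lst f = decide ((lst.count true + (if f then 1 else 0)) = 1) := by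
  induction lst generalizing f with
  | nil => cases f <;> simp [only1Loop]
  | cons b rest ih =>
    cases b <;> cases f <;>
      simp [only1Loop, ih, List.count_cons] <;> omega

-- ===== VERDICT (by name: the statement is the Claim_ definition above) =====
theorem only1_spec : Claim_equal_only1 := by
  intro lst _
  unfold Spec_only1 only1 only1_alt
  rw [altSum_eq, only1Loop_char]
  rcases h : lst.count true with _|_|n <;> simp <;> omega
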